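-- pv_equiv track=rewrite | github.com/sebastian221-art/BELLADONNA_V2 | consejeras/echo/verificador_coherencia.py | _es_sinonimo
-- ===== SOURCE A (Python) =====
-- def _es_sinonimo(verbo, permitidos):
--     """Verifica sinónimos."""
--     sinonimos = {
--         "ver": ["leer", "listar"],
--         "guardar": ["escribir"],
--         "borrar": ["eliminar"],
--     }
--     for p in permitidos:
--         if verbo in sinonimos.get(p, []) or p in sinonimos.get(verbo, []):
--             return True
--     return False
-- ===== SOURCE B (Python) =====
-- def _es_sinonimo(verbo, permitidos):
--     """Verifica sinónimos."""
--     sinonimos = {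
--         "ver": ["leer", "listar"],
--         "guardar": ["escribir"],
--         "borrar": ["eliminar"],
--     }
--     partners = set(sinonimos.get(verbo, []))
--     for k, vals in sinonimos.items():
--         if verbo in vals:
--             partners.add(k)
--     return any(p in partners for p in permitidos)
-- ===== Notes on version B (the rewrite author's own statement) =====
-- stated objective: faster
-- what changed: B precomputes the symmetric synonym-partner set of verbo once (forward entry plus reverse keys) and then makes a single set-membership pass over permitidos, instead of two dict probes and two list scans per element.
import Mathlib
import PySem

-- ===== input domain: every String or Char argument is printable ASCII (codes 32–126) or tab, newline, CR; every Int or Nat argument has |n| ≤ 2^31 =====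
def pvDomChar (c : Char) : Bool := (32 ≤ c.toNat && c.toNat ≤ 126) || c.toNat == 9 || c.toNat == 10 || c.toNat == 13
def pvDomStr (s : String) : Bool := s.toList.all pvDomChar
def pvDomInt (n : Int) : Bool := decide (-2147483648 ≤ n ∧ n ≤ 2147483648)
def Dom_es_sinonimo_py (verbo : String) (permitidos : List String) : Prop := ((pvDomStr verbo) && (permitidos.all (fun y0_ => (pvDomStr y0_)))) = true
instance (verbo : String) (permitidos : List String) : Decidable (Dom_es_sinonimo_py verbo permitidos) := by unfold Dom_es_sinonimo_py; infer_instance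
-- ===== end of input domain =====

-- B builds verbo's symmetric synonym-partner set once and then makes one membership pass
-- over permitidos, instead of probing the dictionary in both directions per element (alternative decomposition).

-- ===== PORT A =====
-- the fixed synonym dictionary of A (and B)
def pvSinonimos : PySem.Dict String (List String) :=
  PySem.Dict.mk [("ver", ["leer", "listar"]), ("guardar", ["escribir"]), ("borrar", ["eliminar"])]

-- the 'for p in permitidos' loop of A: first hit returns True, else False
def pvLoopA (verbo : String) : List String → Bool
  | [] => false
  | p :: rest =>
      if (pvSinonimos.getD p []).contains verbo || (pvSinonimos.getD verbo []).contains p then true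
      else pvLoopA verbo rest

def es_sinonimo_py (verbo : String) (permitidos : List String) : Bool :=
  pvLoopA verbo permitidos

-- ===== PORT B =====
def es_sinonimo_py_alt (verbo : String) (permitidos : List String) : Bool :=
  -- partners = set(sinonimos.get(verbo, []))
  let partners0 : PySem.Set String := PySem.Set.ofList (pvSinonimos.getD verbo [])
  -- for k, vals in sinonimos.items(): if verbo in vals: partners.add(k)
  let partners : PySem.Set String :=
    pvSinonimos.items.foldl
      (fun s kv => if kv.2.contains verbo then PySem.Set.add s kv.1 else s) partners0
  -- any(p in partners for p in permitidos)
  permitidos.any (fun p => PySem.Set.contains partners p)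

-- ===== PRECONDITION & SPEC =====
def Spec_es_sinonimo_py (verbo : String) (permitidos : List String) (out : Bool) : Prop := out = es_sinonimo_py_alt verbo permitidos
instance (verbo : String) (permitidos : List String) (out : Bool) : Decidable (Spec_es_sinonimo_py verbo permitidos out) := by unfold Spec_es_sinonimo_py; infer_instance

-- ===== CLAIM (what is proved, stated in full; the proofs are below) =====
def Claim_equal_es_sinonimo_py : Prop := ∀ (verbo : String) (permitidos : List String), Dom_es_sinonimo_py verbo permitidos → Spec_es_sinonimo_py verbo permitidos (es_sinonimo_py verbo permitidos)

-- ===== LEMMAS AND PROOFS =====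

-- getD on the fixed 3-key dictionary, written out as an if-chain
theorem pv_getD (q : String) :
    pvSinonimos.getD q []
      = if q = "ver" then ["leer", "listar"] else if q = "guardar" then ["escribir"]
        else if q = "borrar" then ["eliminar"] else [] := by
  rw [PySem.Dict.getD_eq_get?_getD]
  simp only [pvSinonimos, PySem.Dict.get?_mk_cons]
  split_ifs <;> simp_all [beq_iff_eq, PySem.Dict.get?]

-- membership in B's partner set = A's per-element test
theorem pv_partner_mem (verbo p : String) :
    PySem.Set.contains
      (pvSinonimos.items.foldl
        (fun s kv => if kv.2.contains verbo then PySem.Set.add s kv.1 else s)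
        (PySem.Set.ofList (pvSinonimos.getD verbo []))) p
    = ((pvSinonimos.getD p []).contains verbo || (pvSinonimos.getD verbo []).contains p) := by
  rw [pv_getD verbo, pv_getD p]
  simp only [pvSinonimos, List.foldl]
  split_ifs <;>
    simp_all [PySem.Set.mem_ofList]

theorem pv_loop_eq (verbo : String) (l : List String) :
    pvLoopA verbo l
      = l.any (fun p =>
          PySem.Set.contains
            (pvSinonimos.items.foldl
              (fun s kv => if kv.2.contains verbo then PySem.Set.add s kv.1 else s)
              (PySem.Set.ofList (pvSinonimos.getD verbo []))) p) := by
  induction l with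
  | nil => rfl
  | cons p rest ih =>
      rw [pvLoopA, List.any_cons, pv_partner_mem]
      cases hc : ((pvSinonimos.getD p []).contains verbo || (pvSinonimos.getD verbo []).contains p) <;>
        simp [ih]

-- ===== VERDICT (by name: the statement is the Claim_ definition above) =====
theorem es_sinonimo_py_spec : Claim_equal_es_sinonimo_py := by
  intro verbo permitidos _
  unfold Spec_es_sinonimo_py es_sinonimo_py es_sinonimo_py_alt
  exact pv_loop_eq verbo permitidos
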